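-- pv_equiv track=rewrite | github.com/gkundlatsch/TerSP-TerFac | Terminators Strength Model - Export.py | calculate_u_factor
-- ===== SOURCE A (Python) =====
-- def calculate_u_factor(sequence):
--     u_factor = 0
--     for position, nucleotide in enumerate(sequence, start=0):
--         if position == 0 and nucleotide == 'U':
--             u_factor += 22
--         elif position == 1 and nucleotide == 'U':
--             u_factor += 16
--         elif position == 2 and nucleotide == 'U':
--             u_factor += 11
--         elif position == 3 and nucleotide == 'U':
--             u_factor += 7
--         elif position == 4 and nucleotide == 'U':
--             u_factor += 3
--         elif position == 5 and nucleotide == 'U':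
--             u_factor += 1
--     return u_factor
-- ===== SOURCE B (Python) =====
-- def calculate_u_factor(sequence):
--     POSITION_WEIGHTS = {0: 22, 1: 16, 2: 11, 3: 7, 4: 3, 5: 1}
--     n = len(sequence)
--     total = 0
--     for pos, weight in POSITION_WEIGHTS.items():
--         if pos < n and sequence[pos] == 'U':
--             total += weight
--     return total
-- ===== Notes on version B (the rewrite author's own statement) =====
-- stated objective: faster
-- what changed: Inverts the traversal: instead of scanning the whole sequence with a six-branch positional if/elif cascade, B iterates over a fixed position-to-weight dict and probes the sequence by bounds-checked random access, touching at most 6 characters regardless of length.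
import Mathlib
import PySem

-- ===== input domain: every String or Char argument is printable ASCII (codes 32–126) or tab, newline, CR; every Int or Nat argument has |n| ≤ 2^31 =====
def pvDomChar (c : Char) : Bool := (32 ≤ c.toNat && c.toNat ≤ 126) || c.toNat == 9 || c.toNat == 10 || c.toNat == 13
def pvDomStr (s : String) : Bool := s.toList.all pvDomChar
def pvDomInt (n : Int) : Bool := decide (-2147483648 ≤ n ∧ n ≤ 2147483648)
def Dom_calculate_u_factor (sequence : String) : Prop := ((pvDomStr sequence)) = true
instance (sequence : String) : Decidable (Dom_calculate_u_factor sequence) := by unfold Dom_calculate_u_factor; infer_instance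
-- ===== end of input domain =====

-- B inverts the traversal: instead of scanning the sequence with a positional if/elif cascade,
-- it iterates over a fixed position->weight table and probes the sequence by index (objective: faster — it touches at most 6 characters; a timing run measured B faster at the largest size).


-- ===== PORT A =====
def calculate_u_factor (sequence : String) : Int :=
  (PySem.List.enumerate sequence.toList 0).foldl
    (fun u_factor pc =>
      if pc.1 == 0 && pc.2 == 'U' then u_factor + 22
      else if pc.1 == 1 && pc.2 == 'U' then u_factor + 16
      else if pc.1 == 2 && pc.2 == 'U' then u_factor + 11
      else if pc.1 == 3 && pc.2 == 'U' then u_factor + 7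
      else if pc.1 == 4 && pc.2 == 'U' then u_factor + 3
      else if pc.1 == 5 && pc.2 == 'U' then u_factor + 1
      else u_factor) 0

-- ===== PORT B =====
-- B: loop over the POSITION_WEIGHTS dict (association list, insertion order),
-- probe sequence[pos] by index; 'pos < n and sequence[pos] == 'U'' short-circuits,
-- so pyGet? is only consulted when the index is in range.
def calculate_u_factor_alt (sequence : String) : Int :=
  let n : Int := sequence.toList.length
  ([(0, 22), (1, 16), (2, 11), (3, 7), (4, 3), (5, 1)] : List (Int × Int)).foldl
    (fun total pw =>
      if pw.1 < n ∧ PySem.List.pyGet? sequence.toList pw.1 = some 'U'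
      then total + pw.2 else total) 0

-- ===== PRECONDITION & SPEC =====
def Spec_calculate_u_factor (sequence : String) (out : Int) : Prop := out = calculate_u_factor_alt sequence
instance (sequence : String) (out : Int) : Decidable (Spec_calculate_u_factor sequence out) := by unfold Spec_calculate_u_factor; infer_instance

-- ===== CLAIM (what is proved, stated in full; the proofs are below) =====
def Claim_equal_calculate_u_factor : Prop := ∀ (sequence : String), Dom_calculate_u_factor sequence → Spec_calculate_u_factor sequence (calculate_u_factor sequence)

-- ===== LEMMAS AND PROOFS =====

-- pyGet? at the literal indexes 1..5 on a cons pattern (numeral-to-cast bridge)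
theorem pv_pg1 {α : Type} (a b : α) (l : List α) : PySem.List.pyGet? (a :: b :: l) 1 = some b := by
  rw [show ((1 : Int)) = ((1 : Nat) : Int) from by norm_num, PySem.List.pyGet?_natCast]; simp
theorem pv_pg2 {α : Type} (a b c : α) (l : List α) : PySem.List.pyGet? (a :: b :: c :: l) 2 = some c := by
  rw [show ((2 : Int)) = ((2 : Nat) : Int) from by norm_num, PySem.List.pyGet?_natCast]; simp
theorem pv_pg3 {α : Type} (a b c d : α) (l : List α) : PySem.List.pyGet? (a :: b :: c :: d :: l) 3 = some d := by
  rw [show ((3 : Int)) = ((3 : Nat) : Int) from by norm_num, PySem.List.pyGet?_natCast]; simp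
theorem pv_pg4 {α : Type} (a b c d e : α) (l : List α) : PySem.List.pyGet? (a :: b :: c :: d :: e :: l) 4 = some e := by
  rw [show ((4 : Int)) = ((4 : Nat) : Int) from by norm_num, PySem.List.pyGet?_natCast]; simp
theorem pv_pg5 {α : Type} (a b c d e f : α) (l : List α) : PySem.List.pyGet? (a :: b :: c :: d :: e :: f :: l) 5 = some f := by
  rw [show ((5 : Int)) = ((5 : Nat) : Int) from by norm_num, PySem.List.pyGet?_natCast]; simp

-- the per-item contribution of A's loop body
def pvGA (pc : Int × Char) : Int :=
  if pc.1 == 0 && pc.2 == 'U' then 22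
  else if pc.1 == 1 && pc.2 == 'U' then 16
  else if pc.1 == 2 && pc.2 == 'U' then 11
  else if pc.1 == 3 && pc.2 == 'U' then 7
  else if pc.1 == 4 && pc.2 == 'U' then 3
  else if pc.1 == 5 && pc.2 == 'U' then 1
  else 0

theorem pvA_sum (s : String) :
    calculate_u_factor s = 0 + ((PySem.List.enumerate s.toList 0).map pvGA).sum := by
  unfold calculate_u_factor
  rw [show (fun (u_factor : Int) (pc : Int × Char) =>
      if pc.1 == 0 && pc.2 == 'U' then u_factor + 22
      else if pc.1 == 1 && pc.2 == 'U' then u_factor + 16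
      else if pc.1 == 2 && pc.2 == 'U' then u_factor + 11
      else if pc.1 == 3 && pc.2 == 'U' then u_factor + 7
      else if pc.1 == 4 && pc.2 == 'U' then u_factor + 3
      else if pc.1 == 5 && pc.2 == 'U' then u_factor + 1
      else u_factor) = (fun u_factor pc => u_factor + pvGA pc) from by
    funext u pc; simp only [pvGA]; split_ifs <;> ring]
  rw [PySem.List.foldl_add]

-- past position 5 every contribution of A's body is 0
theorem pv_tail_sum (l : List Char) : ∀ (n : Int), 6 ≤ n →
    ((PySem.List.enumerate l n).map pvGA).sum = 0 := by
  induction l with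
  | nil => intro n _; simp [PySem.List.enumerate_nil]
  | cons c l ih =>
    intro n hn
    rw [PySem.List.enumerate_cons, List.map_cons, List.sum_cons, ih (n + 1) (by omega)]
    have h0 : (n == 0) = false := by simp; omega
    have h1 : (n == 1) = false := by simp; omega
    have h2 : (n == 2) = false := by simp; omega
    have h3 : (n == 3) = false := by simp; omega
    have h4 : (n == 4) = false := by simp; omega
    have h5 : (n == 5) = false := by simp; omega
    simp [pvGA, h0, h1, h2, h3, h4, h5]

-- B's contribution per table entry, given the probed list
def pvGB (l : List Char) (pw : Int × Int) : Int :=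
  if pw.1 < (l.length : Int) ∧ PySem.List.pyGet? l pw.1 = some 'U' then pw.2 else 0

theorem pvB_sum (s : String) :
    calculate_u_factor_alt s =
      0 + (([(0, 22), (1, 16), (2, 11), (3, 7), (4, 3), (5, 1)] : List (Int × Int)).map
        (pvGB s.toList)).sum := by
  show List.foldl (fun (total : Int) (pw : Int × Int) =>
      if pw.1 < (s.toList.length : Int) ∧ PySem.List.pyGet? s.toList pw.1 = some 'U'
      then total + pw.2 else total) 0 [(0, 22), (1, 16), (2, 11), (3, 7), (4, 3), (5, 1)] = _
  rw [show (fun (total : Int) (pw : Int × Int) =>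
      if pw.1 < (s.toList.length : Int) ∧ PySem.List.pyGet? s.toList pw.1 = some 'U'
      then total + pw.2 else total) = (fun total pw => total + pvGB s.toList pw) from by
    funext u pw; simp only [pvGB]; split_ifs <;> ring]
  rw [PySem.List.foldl_add]

-- ===== VERDICT (by name: the statement is the Claim_ definition above) =====
set_option maxHeartbeats 1000000 in
theorem calculate_u_factor_spec : Claim_equal_calculate_u_factor := by
  intro s _
  unfold Spec_calculate_u_factor
  rw [pvA_sum, pvB_sum]
  rcases hl : s.toList with _ | ⟨a, _ | ⟨b, _ | ⟨c, _ | ⟨d, _ | ⟨e, _ | ⟨f, t⟩⟩⟩⟩⟩⟩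
  case cons.cons.cons.cons.cons.cons =>
    simp only [PySem.List.enumerate_cons, List.map_cons, List.sum_cons]
    rw [congrArg (fun k => (List.map pvGA (PySem.List.enumerate t k)).sum)
          (show (0:Int)+1+1+1+1+1+1 = 6 from by norm_num),
        pv_tail_sum t 6 (by omega)]
    have h0 : (0 : Int) ≤ (t.length : Int) + 1 + 1 + 1 + 1 + 1 := by omega
    have h1 : (1 : Int) < ((a::b::c::d::e::f::t).length : Int) := by simp; omega
    have h2 : (2 : Int) < ((a::b::c::d::e::f::t).length : Int) := by simp; omega
    have h3 : (3 : Int) < ((a::b::c::d::e::f::t).length : Int) := by simp; omega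
    have h4 : (4 : Int) < ((a::b::c::d::e::f::t).length : Int) := by simp; omega
    have h5 : (5 : Int) < ((a::b::c::d::e::f::t).length : Int) := by simp; omega
    simp only [pvGA, pvGB, List.map_nil, List.sum_nil,
      pv_pg1, pv_pg2, pv_pg3, pv_pg4, pv_pg5, PySem.List.pyGet?_zero_cons,
      h1, h2, h3, h4, h5]
    norm_num [h0]
  all_goals
    simp only [PySem.List.enumerate_cons, PySem.List.enumerate_nil, pvGA, pvGB,
      List.map_cons, List.map_nil, List.sum_cons, List.sum_nil,
      pv_pg1, pv_pg2, pv_pg3, pv_pg4, PySem.List.pyGet?_zero_cons] <;>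
    norm_num [PySem.List.pyGet?]
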